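-- pv_equiv track=rewrite | github.com/Amaurytiss/FootballPrediction | RenduProjetFootball/Cotes scrapping/scrapping_winamax.py | matchs_cotes
-- ===== SOURCE A (Python) =====
-- def matchs_cotes(dico_matchs,list_matchs,cleaned_cotes):
--     c=0
--     n=0
--     for i in range(len(cleaned_cotes)-1):
--         dico_matchs[list_matchs[n]].append(cleaned_cotes[i])
--         c+=1
--         if c%3==0:
--             n+=1
--             c=0
--     return dico_matchs
-- ===== SOURCE B (Python) =====
-- def matchs_cotes(dico_matchs, list_matchs, cleaned_cotes):
--     total = len(cleaned_cotes) - 1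
--     idx = 0
--     n = 0
--     while idx < total:
--         chunk = cleaned_cotes[idx:min(idx + 3, total)]
--         dico_matchs[list_matchs[n]].extend(chunk)
--         idx += 3
--         n += 1
--     return dico_matchs
-- ===== Notes on version B (the rewrite author's own statement) =====
-- stated objective: alternative
-- what changed: Replaces the per-element modulo-3 counter loop (one dict lookup and append per odd) with a while loop that slices a chunk of up to three odds and extends the match's list once per chunk.
import Mathlib
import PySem

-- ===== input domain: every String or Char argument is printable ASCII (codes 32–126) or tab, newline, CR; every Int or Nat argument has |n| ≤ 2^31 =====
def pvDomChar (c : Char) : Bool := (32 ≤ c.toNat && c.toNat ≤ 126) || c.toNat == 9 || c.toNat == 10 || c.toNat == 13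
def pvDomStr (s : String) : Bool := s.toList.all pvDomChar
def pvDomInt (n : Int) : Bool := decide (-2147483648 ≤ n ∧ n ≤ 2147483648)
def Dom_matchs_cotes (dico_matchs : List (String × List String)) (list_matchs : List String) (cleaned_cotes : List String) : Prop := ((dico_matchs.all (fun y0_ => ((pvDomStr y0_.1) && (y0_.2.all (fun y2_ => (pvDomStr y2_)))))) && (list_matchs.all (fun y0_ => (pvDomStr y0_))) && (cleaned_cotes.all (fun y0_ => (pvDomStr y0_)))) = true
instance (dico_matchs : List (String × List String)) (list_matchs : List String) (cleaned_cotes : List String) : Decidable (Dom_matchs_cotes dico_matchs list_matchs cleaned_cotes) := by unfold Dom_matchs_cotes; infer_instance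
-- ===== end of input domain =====

-- B replaces A's per-element modulo-3 counter loop by a chunk-of-three slice-and-extend loop
-- (an alternative decomposition, same cost). Both A and B mutate dico_matchs in place in Python;
-- the equivalence proved here is about the returned value.

-- ===== PORT A =====
-- one iteration of A's for-loop body: state is (dict, c, n); the none branches are where
-- Python raises IndexError/KeyError — those inputs are excluded by Pre_matchs_cotes
def pvStepA (list_matchs : List String)
    (s : PySem.Dict String (List String) × Nat × Nat) (x : String) :
    PySem.Dict String (List String) × Nat × Nat :=
  match s with
  | (d, c, n) =>
    match list_matchs[n]? with
    | none => (d, c, n)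
    | some k =>
      match d.get? k with
      | none => (d, c, n)
      | some v =>
        let d' := d.insert k (v ++ [x])
        if (c + 1) % 3 == 0 then (d', 0, n + 1) else (d', c + 1, n)

def matchs_cotes (dico_matchs : List (String × List String)) (list_matchs : List String) (cleaned_cotes : List String) : List (String × List String) :=
  -- range(len(cleaned_cotes)-1); Nat sub: empty range when len = 0, exactly like Python
  (((List.range (cleaned_cotes.length - 1)).foldl
      (fun s i => pvStepA list_matchs s (cleaned_cotes.getD i ""))   -- cleaned_cotes[i], i always in range here
      (PySem.Dict.mk dico_matchs, 0, 0)).1).items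

-- ===== PORT B =====
-- the while loop of Source B: rest is the suffix cleaned_cotes[idx:total]; chunk = rest[:3];
-- the none branches are where Python raises (excluded by Pre_matchs_cotes)
def pvGoB (list_matchs : List String)
    (d : PySem.Dict String (List String)) (n : Nat) (rest : List String) :
    PySem.Dict String (List String) :=
  match rest with
  | [] => d
  | x :: xs =>
    let chunk := (x :: xs).take 3
    let d' :=
      match list_matchs[n]? with
      | none => d
      | some k =>
        match d.get? k with
        | none => d
        | some v => d.insert k (v ++ chunk)
    pvGoB list_matchs d' (n + 1) (xs.drop 2)
termination_by rest.length
decreasing_by simp [List.length_drop]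

def matchs_cotes_alt (dico_matchs : List (String × List String)) (list_matchs : List String) (cleaned_cotes : List String) : List (String × List String) :=
  (pvGoB list_matchs (PySem.Dict.mk dico_matchs) 0 (cleaned_cotes.take (cleaned_cotes.length - 1))).items

-- ===== PRECONDITION & SPEC =====
-- Pre_ excludes exactly the inputs on which A raises (IndexError on list_matchs[n] or KeyError
-- on dico_matchs[...]): every group index used by the loop must name an existing dict key.
def Pre_matchs_cotes (dico_matchs : List (String × List String)) (list_matchs : List String) (cleaned_cotes : List String) : Prop :=
  ((List.range ((cleaned_cotes.length - 1 + 2) / 3)).all (fun m =>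
    match list_matchs[m]? with
    | some k => (PySem.Dict.mk dico_matchs).contains k
    | none => false)) = true
instance (dico_matchs : List (String × List String)) (list_matchs : List String) (cleaned_cotes : List String) : Decidable (Pre_matchs_cotes dico_matchs list_matchs cleaned_cotes) := by unfold Pre_matchs_cotes; infer_instance

def pvWitness_matchs_cotes : (List (String × List String)) × List String × List String :=
  ([("psg - om", []), ("lyon - nice", [])], ["psg - om", "lyon - nice"], ["1.5", "3.2", "4.1", "2.0", "3.0", "3.1", "9.9"])

def Spec_matchs_cotes (dico_matchs : List (String × List String)) (list_matchs : List String) (cleaned_cotes : List String) (out : List (String × List String)) : Prop := out = matchs_cotes_alt dico_matchs list_matchs cleaned_cotes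
instance (dico_matchs : List (String × List String)) (list_matchs : List String) (cleaned_cotes : List String) (out : List (String × List String)) : Decidable (Spec_matchs_cotes dico_matchs list_matchs cleaned_cotes out) := by unfold Spec_matchs_cotes; infer_instance

-- ===== CLAIM (what is proved, stated in full; the proofs are below) =====
def Claim_equal_matchs_cotes : Prop := ∀ (dico_matchs : List (String × List String)) (list_matchs : List String) (cleaned_cotes : List String), Dom_matchs_cotes dico_matchs list_matchs cleaned_cotes → Pre_matchs_cotes dico_matchs list_matchs cleaned_cotes → Spec_matchs_cotes dico_matchs list_matchs cleaned_cotes (matchs_cotes dico_matchs list_matchs cleaned_cotes)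

-- ===== LEMMAS AND PROOFS =====

-- folding A's body over range t with indexing = folding it over the first t elements
lemma pv_foldl_range_getD {α : Type} (f : α → String → α) (xs : List String) :
    ∀ (t : Nat), t ≤ xs.length → ∀ (s0 : α),
    (List.range t).foldl (fun s i => f s (xs.getD i "")) s0 = (xs.take t).foldl f s0 := by
  intro t
  induction t with
  | zero => intro _ s0; simp
  | succ t ih =>
    intro ht s0
    rw [List.range_succ, List.foldl_append, ih (by omega)]
    have ht' : t < xs.length := by omega
    have hx : xs.take (t + 1) = xs.take t ++ [xs[t]] := by
      rw [List.take_add_one, List.getElem?_eq_getElem ht']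
      rfl
    rw [hx, List.foldl_append]
    simp only [List.foldl_cons, List.foldl_nil]
    rw [List.getD_eq_getElem xs "" ht']

-- the chunk loop of B computes the first projection of A's per-element fold
lemma pv_goB_eq (lm : List String) :
    ∀ (fuel : Nat) (xs : List String) (d : PySem.Dict String (List String)) (n : Nat),
    xs.length ≤ fuel →
    (∀ m : Nat, n ≤ m → m < n + (xs.length + 2) / 3 →
      match lm[m]? with
      | some k => d.contains k = true
      | none => False) →
    (xs.foldl (pvStepA lm) (d, 0, n)).1 = pvGoB lm d n xs := by
  intro fuel
  induction fuel with
  | zero =>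
    intro xs d n hlen _
    have : xs = [] := List.eq_nil_of_length_eq_zero (by omega)
    subst this; simp [pvGoB]
  | succ fuel ih =>
    intro xs d n hlen hpre
    match xs with
    | [] => simp [pvGoB]
    | a :: rest1 =>
      -- the key for group n exists
      have h0 := hpre n (le_refl n) (by simp only [List.length_cons]; omega)
      obtain ⟨k, hk, hdk⟩ : ∃ k, lm[n]? = some k ∧ d.contains k = true := by
        cases h : lm[n]? with
        | none => rw [h] at h0; exact absurd h0 (by simp)
        | some k => rw [h] at h0; exact ⟨k, rfl, h0⟩
      obtain ⟨v, hv⟩ : ∃ v, d.get? k = some v := by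
        have := PySem.Dict.contains_eq_isSome_get? (d := d) (k := k)
        rw [hdk] at this
        cases hg : d.get? k with
        | none => rw [hg] at this; simp at this
        | some v => exact ⟨v, rfl⟩
      match rest1 with
      | [] =>
        -- chunk of one
        simp [pvGoB, pvStepA, hk, hv]
      | [b] =>
        -- chunk of two
        simp only [List.foldl_cons, List.foldl_nil]
        rw [show pvStepA lm (d, 0, n) a = (d.insert k (v ++ [a]), 1, n) by
              simp [pvStepA, hk, hv]]
        rw [show pvStepA lm (d.insert k (v ++ [a]), 1, n) b
              = ((d.insert k (v ++ [a])).insert k (v ++ [a] ++ [b]), 2, n) by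
              simp [pvStepA, hk, PySem.Dict.get?_insert_self]]
        simp [pvGoB, hk, hv, PySem.Dict.insert_insert_self]
      | b :: c :: rest =>
        simp only [List.foldl_cons]
        rw [show pvStepA lm (d, 0, n) a = (d.insert k (v ++ [a]), 1, n) by
              simp [pvStepA, hk, hv]]
        rw [show pvStepA lm (d.insert k (v ++ [a]), 1, n) b
              = ((d.insert k (v ++ [a])).insert k (v ++ [a] ++ [b]), 2, n) by
              simp [pvStepA, hk, PySem.Dict.get?_insert_self]]
        rw [show pvStepA lm ((d.insert k (v ++ [a])).insert k (v ++ [a] ++ [b]), 2, n) c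
              = (((d.insert k (v ++ [a])).insert k (v ++ [a] ++ [b])).insert k (v ++ [a] ++ [b] ++ [c]), 0, n + 1) by
              simp [pvStepA, hk, PySem.Dict.get?_insert_self]]
        have hcollapse : ((d.insert k (v ++ [a])).insert k (v ++ [a] ++ [b])).insert k (v ++ [a] ++ [b] ++ [c])
            = d.insert k (v ++ [a, b, c]) := by
          rw [PySem.Dict.insert_insert_self, PySem.Dict.insert_insert_self]
          simp
        rw [hcollapse]
        have hgoal := ih rest (d.insert k (v ++ [a, b, c])) (n + 1)
          (by simp at hlen ⊢; omega)
          (by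
            intro m hm1 hm2
            have := hpre m (by omega) (by
              have : (rest.length + 3 + 2) / 3 = (rest.length + 2) / 3 + 1 := by omega
              simp only [List.length_cons] at *
              omega)
            cases h : lm[m]? with
            | none => rw [h] at this; exact this
            | some k' =>
              rw [h] at this
              simp [PySem.Dict.contains_insert, this])
        rw [hgoal]
        conv_rhs => rw [pvGoB]
        simp [hk, hv]

-- ===== VERDICT (by name: the statement is the Claim_ definition above) =====
theorem matchs_cotes_spec : Claim_equal_matchs_cotes := by
  intro dico lm cc _ hpre
  unfold Spec_matchs_cotes matchs_cotes matchs_cotes_alt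
  have hle : cc.length - 1 ≤ cc.length := by omega
  rw [pv_foldl_range_getD (pvStepA lm) cc (cc.length - 1) hle]
  have hlen : (cc.take (cc.length - 1)).length = cc.length - 1 := by simp
  have hcond : ∀ m : Nat, 0 ≤ m → m < 0 + ((cc.take (cc.length - 1)).length + 2) / 3 →
      match lm[m]? with
      | some k => (PySem.Dict.mk dico).contains k = true
      | none => False := by
    intro m _ hm2
    unfold Pre_matchs_cotes at hpre
    rw [List.all_eq_true] at hpre
    have h := hpre m (by rw [List.mem_range]; rw [hlen] at hm2; omega)
    cases hx : lm[m]? with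
    | none => rw [hx] at h; simp at h
    | some k => rw [hx] at h; simpa using h
  rw [pv_goB_eq lm (cc.take (cc.length - 1)).length (cc.take (cc.length - 1))
      (PySem.Dict.mk dico) 0 (le_refl _) hcond]
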